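-- pv_equiv track=rewrite | github.com/vladis62/only-algo |  yandex/sprint_1/final_review/hand_agility.py | hand_agility
-- ===== SOURCE A (Python) =====
-- def hand_agility(field, n):
--     max_touch = n * 2
--     numbers_to_count = {}
--     for i in range(0, 4):
--         for j in range(0, 4):
--             num = field[i][j]
--             if field[i][j] != '.':
--                 numbers_to_count[num] = numbers_to_count.get(num, 0) + 1
--     return sum(count <= max_touch for count in numbers_to_count.values())
-- ===== SOURCE B (Python) =====
-- def hand_agility(field, n):
--     flat = sorted(field[i][j] for i in range(4) for j in range(4) if field[i][j] != '.')
--     def runs(lst):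
--         if not lst:
--             return 0
--         head = lst[0]
--         k = 1
--         while k < len(lst) and lst[k] == head:
--             k += 1
--         return int(k <= 2 * n) + runs(lst[k:])
--     return runs(flat)
-- ===== Notes on version B (the rewrite author's own statement) =====
-- stated objective: alternative
-- what changed: Replaces A's hash-table frequency counting with a sort-then-scan algorithm: flatten the non-'.' cells, sort them so equal values are adjacent, then one recursive scan over the sorted list counts each run and tests its length against 2*n -- no dictionary at all.
import Mathlib
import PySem

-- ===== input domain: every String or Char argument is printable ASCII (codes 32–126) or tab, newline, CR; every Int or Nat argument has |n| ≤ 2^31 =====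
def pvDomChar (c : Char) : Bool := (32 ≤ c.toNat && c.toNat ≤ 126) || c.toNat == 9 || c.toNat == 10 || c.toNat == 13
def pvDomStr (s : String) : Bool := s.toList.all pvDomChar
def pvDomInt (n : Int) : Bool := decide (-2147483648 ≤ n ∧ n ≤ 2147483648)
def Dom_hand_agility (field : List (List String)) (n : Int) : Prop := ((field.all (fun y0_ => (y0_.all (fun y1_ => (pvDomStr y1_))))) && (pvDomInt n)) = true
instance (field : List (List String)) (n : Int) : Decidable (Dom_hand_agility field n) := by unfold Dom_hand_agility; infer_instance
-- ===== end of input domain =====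

-- B replaces A's frequency dictionary with sort-then-scan: flatten the non-'.' cells, sort them,
-- and count in one recursive scan the runs whose length is ≤ 2*n (objective: alternative algorithm).


-- ===== PORT A =====
def hand_agility (field : List (List String)) (n : Int) : Int :=
  let max_touch := n * 2
  let numbers_to_count :=
    (PySem.List.pyRange 0 4 1).foldl (fun d i =>
      (PySem.List.pyRange 0 4 1).foldl (fun d j =>
        -- field[i][j]: in range for every input admitted by Pre_ (pyGetD's defaults are never used there)
        let num := PySem.List.pyGetD (PySem.List.pyGetD field i []) j "."
        if num ≠ "." then d.insert num (d.getD num 0 + 1) else d) d)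
      PySem.Dict.empty
  ((numbers_to_count.values).map (fun count => if count ≤ max_touch then (1 : Int) else 0)).foldl (· + ·) 0

-- ===== PORT B =====
-- the inner 'while k < len(lst) and lst[k] == head: k += 1' scans the run of cells equal to
-- head starting at index 1; its result k satisfies lst.drop k = tail.dropWhile (== head) and
-- k = 1 + (tail.takeWhile (== head)).length, which is how the loop is transcribed here (exact)
def hand_agility_runs (t : Int) : List String → Int
  | [] => 0
  | head :: tail =>
      (if (1 + ((tail.takeWhile (fun c => c == head)).length : Int)) ≤ t then (1 : Int) else 0)
        + hand_agility_runs t (tail.dropWhile (fun c => c == head))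
termination_by l => l.length
decreasing_by
  have := List.length_dropWhile_le (fun c => c == head) tail
  simp; omega

def hand_agility_alt (field : List (List String)) (n : Int) : Int :=
  -- sorted(field[i][j] for i in range(4) for j in range(4) if field[i][j] != '.')
  -- (pyGetD's defaults are never used on inputs admitted by Pre_)
  let flat := PySem.List.sorted
    ((PySem.List.pyRange 0 4 1).flatMap (fun i =>
      (PySem.List.pyRange 0 4 1).flatMap (fun j =>
        let c := PySem.List.pyGetD (PySem.List.pyGetD field i []) j "."
        if c ≠ "." then [c] else [])))
    (fun x => x) false
  hand_agility_runs (2 * n) flat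

-- ===== PRECONDITION & SPEC =====
-- Pre_ excludes exactly the grids on which A raises IndexError (fewer than 4 rows, or a short row among the first 4).
def Pre_hand_agility (field : List (List String)) (n : Int) : Prop :=
  4 ≤ field.length ∧ ∀ row ∈ field.take 4, 4 ≤ row.length
instance (field : List (List String)) (n : Int) : Decidable (Pre_hand_agility field n) := by unfold Pre_hand_agility; infer_instance
def pvWitness_hand_agility : List (List String) × Int :=
  ([["1", ".", "2", "1"], ["3", "3", ".", "."], [".", "1", "2", "2"], ["2", ".", "3", "1"]], 2)

def Spec_hand_agility (field : List (List String)) (n : Int) (out : Int) : Prop := out = hand_agility_alt field n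
instance (field : List (List String)) (n : Int) (out : Int) : Decidable (Spec_hand_agility field n out) := by unfold Spec_hand_agility; infer_instance

-- ===== CLAIM (what is proved, stated in full; the proofs are below) =====
def Claim_equal_hand_agility : Prop := ∀ (field : List (List String)) (n : Int), Dom_hand_agility field n → Pre_hand_agility field n → Spec_hand_agility field n (hand_agility field n)

-- ===== LEMMAS AND PROOFS =====

-- the common middle form: for each distinct value of l, test its multiplicity in l against t
def pvDistinctLeSum (l : List String) (t : Int) : Int :=
  ((PySem.Set.ofList l).map (fun v => if ((l.count v : Int) ≤ t) then (1 : Int) else 0)).sum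

-- mapping g over the values walked by 'for i in range(len(xs))' is mapping g over xs
theorem map_comp_pyGetD {α β : Type} (xs : List α) (d : α) (g : α → β) :
    List.map (fun i => g (PySem.List.pyGetD xs i d)) (PySem.List.pyRange 0 (xs.length : Int)) = xs.map g := by
  calc List.map (fun i => g (PySem.List.pyGetD xs i d)) (PySem.List.pyRange 0 (xs.length : Int))
      = List.map g (List.map (fun i => PySem.List.pyGetD xs i d) (PySem.List.pyRange 0 (xs.length : Int))) :=
        (List.map_map).symm
    _ = xs.map g := by rw [PySem.List.map_pyGetD_pyRange_zero']

-- a list built by 'if p(x): out.append(x)' is a filter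
theorem flatMap_ite_singleton {α : Type} (p : α → Prop) [DecidablePred p] (l : List α) :
    (l.flatMap fun x => if p x then [x] else []) = l.filter (fun x => decide (p x)) := by
  induction l with
  | nil => rfl
  | cons x xs ih =>
    simp only [List.flatMap_cons, List.filter_cons, ih]
    by_cases h : p x <;> simp [h]

-- B's comprehension enumerates exactly the non-'.' cells of the 4x4 block, row by row
theorem flat_eq (field : List (List String))
    (h1 : 4 ≤ field.length) (h2 : ∀ row ∈ field.take 4, 4 ≤ row.length) :
    ((PySem.List.pyRange 0 4 1).flatMap (fun i =>
      (PySem.List.pyRange 0 4 1).flatMap (fun j =>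
        let c := PySem.List.pyGetD (PySem.List.pyGetD field i []) j "."
        if c ≠ "." then [c] else [])))
    = (field.take 4).flatMap (fun row => (row.take 4).filter (fun c => c ≠ ".")) := by
  set F := field.take 4 with hF
  have hFlen : F.length = 4 := by simp [hF]; omega
  have hrows : ∀ i ∈ PySem.List.pyRange 0 4 1,
      PySem.List.pyGetD field i [] = PySem.List.pyGetD F i [] := by
    intro i hi
    rw [PySem.List.mem_pyRange_one] at hi
    rw [PySem.List.pyGetD_eq_getElem _ _ hi.1 (by omega),
        PySem.List.pyGetD_eq_getElem _ _ hi.1 (by omega)]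
    simp [hF]
  have hinner : ∀ row ∈ F,
      ((PySem.List.pyRange 0 4 1).flatMap (fun j =>
        let c := PySem.List.pyGetD row j "."
        if c ≠ "." then [c] else []))
      = (row.take 4).filter (fun c => c ≠ ".") := by
    intro row hrow
    have hlen : 4 ≤ row.length := h2 row hrow
    have hcells : ∀ j ∈ PySem.List.pyRange 0 4 1,
        PySem.List.pyGetD row j "." = PySem.List.pyGetD (row.take 4) j "." := by
      intro j hj
      rw [PySem.List.mem_pyRange_one] at hj
      rw [PySem.List.pyGetD_eq_getElem _ _ hj.1 (by omega),
          PySem.List.pyGetD_eq_getElem _ _ hj.1 (by simp; omega)]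
      simp
    rw [List.flatMap_def,
        List.map_congr_left (fun j hj => by simp only; rw [hcells j hj])]
    have h4 : (4 : Int) = ((row.take 4).length : Int) := by simp; omega
    rw [h4, map_comp_pyGetD (row.take 4) "." (fun c => if c ≠ "." then [c] else []),
        ← List.flatMap_def, flatMap_ite_singleton]
  rw [List.flatMap_def,
      List.map_congr_left (fun i hi => by
        rw [hrows i hi,
            hinner (PySem.List.pyGetD F i []) (PySem.List.pyGetD_mem F []
              (by rw [PySem.List.mem_pyRange_one] at hi
                  simp [PySem.Raise.InRange]; omega))]),
      ]
  have h4 : (4 : Int) = (F.length : Int) := by rw [hFlen]; norm_num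
  rw [h4, map_comp_pyGetD F [] (fun row => (row.take 4).filter (fun c => c ≠ ".")),
      ← List.flatMap_def]

-- A's nested index loop builds exactly Counter(flat), flat = the non-'.' cells of the 4x4 block.
theorem build_eq_counter (field : List (List String))
    (h1 : 4 ≤ field.length) (h2 : ∀ row ∈ field.take 4, 4 ≤ row.length) :
    (PySem.List.pyRange 0 4 1).foldl (fun d i =>
      (PySem.List.pyRange 0 4 1).foldl (fun d j =>
        let num := PySem.List.pyGetD (PySem.List.pyGetD field i []) j "."
        if num ≠ "." then d.insert num (d.getD num 0 + 1) else d) d)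
      PySem.Dict.empty
    = PySem.Dict.counter
        ((field.take 4).flatMap (fun row => (row.take 4).filter (fun c => c ≠ "."))) := by
  set F := field.take 4 with hF
  have hFlen : F.length = 4 := by simp [hF]; omega
  -- replace field by its first four rows in the loop body
  have hrows : ∀ i ∈ PySem.List.pyRange 0 4 1,
      PySem.List.pyGetD field i [] = PySem.List.pyGetD F i [] := by
    intro i hi
    rw [PySem.List.mem_pyRange_one] at hi
    rw [PySem.List.pyGetD_eq_getElem _ _ hi.1 (by omega),
        PySem.List.pyGetD_eq_getElem _ _ hi.1 (by omega)]
    simp [hF]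
  have houter :
      (PySem.List.pyRange 0 4 1).foldl (fun d i =>
        (PySem.List.pyRange 0 4 1).foldl (fun d j =>
          let num := PySem.List.pyGetD (PySem.List.pyGetD field i []) j "."
          if num ≠ "." then d.insert num (d.getD num 0 + 1) else d) d)
        PySem.Dict.empty
      = F.foldl (fun d row =>
          (PySem.List.pyRange 0 4 1).foldl (fun d j =>
            let num := PySem.List.pyGetD row j "."
            if num ≠ "." then d.insert num (d.getD num 0 + 1) else d) d)
          (PySem.Dict.empty : PySem.Dict String Int) := by
    rw [PySem.List.foldl_congr_mem (g := fun d i =>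
        (PySem.List.pyRange 0 4 1).foldl (fun d j =>
          let num := PySem.List.pyGetD (PySem.List.pyGetD F i []) j "."
          if num ≠ "." then d.insert num (d.getD num 0 + 1) else d) d)
        (h := by intro d i hi; rw [hrows i hi])]
    have h4 : (4 : Int) = (F.length : Int) := by rw [hFlen]; norm_num
    rw [h4]
    exact PySem.List.foldl_pyRange_zero_pyGetD' F []
      (fun d row =>
        (PySem.List.pyRange 0 (F.length : Int) 1).foldl (fun d j =>
          let num := PySem.List.pyGetD row j "."
          if num ≠ "." then d.insert num (d.getD num 0 + 1) else d) d)
      (PySem.Dict.empty : PySem.Dict String Int)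
  refine houter.trans ?_
  -- each inner loop walks the first four cells of its row
  have hinner : ∀ (d : PySem.Dict String Int), ∀ row ∈ F,
      (PySem.List.pyRange 0 4 1).foldl (fun d j =>
        let num := PySem.List.pyGetD row j "."
        if num ≠ "." then d.insert num (d.getD num 0 + 1) else d) d
      = (row.take 4).foldl (fun d num =>
          if num ≠ "." then d.insert num (d.getD num 0 + 1) else d) d := by
    intro d row hrow
    have hlen : 4 ≤ row.length := h2 row hrow
    have hcells : ∀ j ∈ PySem.List.pyRange 0 4 1,
        PySem.List.pyGetD row j "." = PySem.List.pyGetD (row.take 4) j "." := by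
      intro j hj
      rw [PySem.List.mem_pyRange_one] at hj
      rw [PySem.List.pyGetD_eq_getElem _ _ hj.1 (by omega),
          PySem.List.pyGetD_eq_getElem _ _ hj.1 (by simp; omega)]
      simp
    rw [PySem.List.foldl_congr_mem (g := fun d j =>
        let num := PySem.List.pyGetD (row.take 4) j "."
        if num ≠ "." then d.insert num (d.getD num 0 + 1) else d)
        (h := by intro d j hj; simp only; rw [hcells j hj])]
    have h4 : (4 : Int) = ((row.take 4).length : Int) := by simp; omega
    rw [h4]
    exact PySem.List.foldl_pyRange_zero_pyGetD' (row.take 4) "."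
      (fun d num => if num ≠ "." then d.insert num (d.getD num 0 + 1) else d) d
  rw [PySem.List.foldl_congr_mem (h := by intro d row hrow; exact hinner d row hrow)
      (g := fun d row => (row.take 4).foldl (fun d num =>
          if num ≠ "." then d.insert num (d.getD num 0 + 1) else d) d)]
  -- fold over rows of folds = fold over the flattened filtered list, which is Counter
  rw [← PySem.Dict.foldl_insert_getD_add_one_eq_counter]
  rw [List.flatMap_def, List.foldl_flatten, List.foldl_map]
  apply PySem.List.foldl_congr_mem
  intro d row hrow
  rw [PySem.List.foldl_ite_eq_foldl_filter]

-- A's final generator sum is the common middle form over flat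
theorem a_eq_sum (field : List (List String)) (n : Int)
    (h1 : 4 ≤ field.length) (h2 : ∀ row ∈ field.take 4, 4 ≤ row.length) :
    hand_agility field n
      = pvDistinctLeSum ((field.take 4).flatMap (fun row => (row.take 4).filter (fun c => c ≠ "."))) (2 * n) := by
  simp only [hand_agility, pvDistinctLeSum]
  rw [build_eq_counter field h1 h2]
  simp only [PySem.Dict.values, PySem.Dict.items_counter, List.map_map]
  rw [← List.sum_eq_foldl]
  congr 1
  apply List.map_congr_left
  intro v _
  simp [Int.mul_comm]

-- the middle form only depends on the multiset of cells
theorem sum_perm (l1 l2 : List String) (t : Int) (hp : l1.Perm l2) :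
    pvDistinctLeSum l1 t = pvDistinctLeSum l2 t := by
  unfold pvDistinctLeSum
  have hsets : (PySem.Set.ofList l1).Perm (PySem.Set.ofList l2) := by
    rw [List.perm_ext_iff_of_nodup (PySem.Set.nodup_ofList l1) (PySem.Set.nodup_ofList l2)]
    intro a
    rw [PySem.Set.mem_ofList, PySem.Set.mem_ofList]
    exact ⟨fun h => hp.mem_iff.mp h, fun h => hp.mem_iff.mpr h⟩
  have hmap : (PySem.Set.ofList l2).map (fun v => if ((l1.count v : Int) ≤ t) then (1 : Int) else 0)
      = (PySem.Set.ofList l2).map (fun v => if ((l2.count v : Int) ≤ t) then (1 : Int) else 0) := by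
    apply List.map_congr_left
    intro v _
    rw [hp.count_eq]
  rw [← hmap]
  exact (hsets.map _).sum_eq

-- on a sorted list, the leading run of the tail is all the remaining copies of the head
theorem takeWhile_eq_filter_sorted (v : String) (rest : List String)
    (hge : ∀ x ∈ rest, v ≤ x) (hp : rest.Pairwise (· ≤ ·)) :
    rest.takeWhile (fun c => c == v) = rest.filter (fun c => c == v)
      ∧ rest.dropWhile (fun c => c == v) = rest.filter (fun c => !(c == v)) := by
  induction rest with
  | nil => exact ⟨rfl, rfl⟩
  | cons x xs ih =>
    have hgx : ∀ y ∈ xs, v ≤ y := fun y hy => hge y (List.mem_cons_of_mem x hy)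
    have hpx : xs.Pairwise (· ≤ ·) := (List.pairwise_cons.mp hp).2
    by_cases hx : x = v
    · subst hx
      have hih := ih hgx hpx
      constructor
      · rw [List.takeWhile_cons_of_pos (by simp), List.filter_cons_of_pos (by simp), hih.1]
      · rw [List.dropWhile_cons_of_pos (by simp), List.filter_cons_of_neg (by simp), hih.2]
    · -- x ≠ v, and v ≤ x, so v < x; every later element y has x ≤ y hence v < y, so y ≠ v
      have hvx : v < x := lt_of_le_of_ne (hge x (List.mem_cons_self)) (fun h => hx h.symm)
      have hnone : ∀ y ∈ x :: xs, ¬(y == v) = true := by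
        intro y hy hyv
        rcases List.mem_cons.mp hy with h | h
        · exact hx (by subst h; exact (beq_iff_eq.mp hyv))
        · have hxy : x ≤ y := (List.pairwise_cons.mp hp).1 y h
          have : v < y := lt_of_lt_of_le hvx hxy
          exact absurd (beq_iff_eq.mp hyv) (ne_of_gt this)
      constructor
      · rw [List.takeWhile_cons_of_neg (by simpa using hnone x List.mem_cons_self)]
        rw [List.filter_cons_of_neg (by simpa using hnone x List.mem_cons_self)]
        symm
        rw [List.filter_eq_nil_iff]
        intro y hy
        simpa using hnone y (List.mem_cons_of_mem x hy)
      · rw [List.dropWhile_cons_of_neg (by simpa using hnone x List.mem_cons_self)]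
        rw [List.filter_cons_of_pos (by simpa using hnone x List.mem_cons_self)]
        congr 1
        symm
        rw [List.filter_eq_self]
        intro y hy
        simpa using hnone y (List.mem_cons_of_mem x hy)

-- B's run scanner on a sorted list is the common middle form
theorem runs_eq_sum (t : Int) (l : List String) (h : l.Pairwise (· ≤ ·)) :
    hand_agility_runs t l = pvDistinctLeSum l t := by
  induction hk : l.length using Nat.strong_induction_on generalizing l with
  | _ k ih =>
  cases l with
  | nil => simp [hand_agility_runs, pvDistinctLeSum, PySem.Set.ofList]
  | cons v rest =>
    obtain ⟨hvle, hp⟩ := List.pairwise_cons.mp h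
    obtain ⟨htw, hdw⟩ := takeWhile_eq_filter_sorted v rest hvle hp
    set l' := rest.filter (fun c => !(c == v)) with hl'
    have hvnot : v ∉ l' := by
      intro hv
      have := List.of_mem_filter hv
      simp at this
    have hl'p : l'.Pairwise (· ≤ ·) := hp.sublist List.filter_sublist
    have hl'len : l'.length < k := by
      have hle := (List.filter_sublist (p := fun c => !(c == v)) (l := rest)).length_le
      have hk' : rest.length + 1 = k := by simpa using hk
      rw [hl']; omega
    -- recursive call via the induction hypothesis
    have hrec := ih l'.length hl'len l' hl'p rfl
    -- the head indicator: 1 + length of the run = count of v in v :: rest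
    have hcount : ((v :: rest).count v : Int) = 1 + ((rest.takeWhile (fun c => c == v)).length : Int) := by
      rw [htw, List.count_cons_self]
      have : rest.count v = (rest.filter (fun c => c == v)).length := by
        rw [List.count_eq_length_filter]
      rw [this]; push_cast; ring
    -- counts of other values are unchanged by removing the v's
    have hcounts : ∀ w ∈ PySem.Set.ofList l', (l'.count w : Int) = ((v :: rest).count w : Int) := by
      intro w hw
      have hwv : w ≠ v := by
        intro hwv; subst hwv
        exact hvnot ((PySem.Set.mem_ofList l' w).mp hw)
      rw [hl', List.count_filter (by simpa using hwv)]
      simp [List.count_cons]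
      exact fun hvw => hwv hvw.symm
    -- the distinct values of v :: rest are a permutation of v :: distinct values of l'
    have hperm : (PySem.Set.ofList (v :: rest)).Perm (v :: PySem.Set.ofList l') := by
      rw [List.perm_ext_iff_of_nodup (PySem.Set.nodup_ofList _)
        (List.nodup_cons.mpr ⟨fun hc => hvnot ((PySem.Set.mem_ofList l' v).mp hc), PySem.Set.nodup_ofList l'⟩)]
      intro a
      rw [PySem.Set.mem_ofList, List.mem_cons, List.mem_cons, PySem.Set.mem_ofList, hl']
      constructor
      · rintro (rfl | ha)
        · left; rfl
        · by_cases hav : a = v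
          · left; exact hav
          · right; exact List.mem_filter.mpr ⟨ha, by simp [hav]⟩
      · rintro (rfl | ha)
        · left; rfl
        · right; exact List.mem_of_mem_filter ha
    -- assemble
    rw [hand_agility_runs, hdw, hrec]
    unfold pvDistinctLeSum
    rw [((hperm.map (fun w => if (((v :: rest).count w : Int) ≤ t) then (1 : Int) else 0))).sum_eq]
    rw [List.map_cons, List.sum_cons, ← hcount]
    congr 1
    exact congrArg List.sum (List.map_congr_left (fun w hw => by rw [hcounts w hw]))

-- B computes the middle form over its (unsorted) flat list
theorem b_eq_sum (field : List (List String)) (n : Int)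
    (h1 : 4 ≤ field.length) (h2 : ∀ row ∈ field.take 4, 4 ≤ row.length) :
    hand_agility_alt field n
      = pvDistinctLeSum ((field.take 4).flatMap (fun row => (row.take 4).filter (fun c => c ≠ "."))) (2 * n) := by
  simp only [hand_agility_alt]
  rw [flat_eq field h1 h2]
  set base := (field.take 4).flatMap (fun row => (row.take 4).filter (fun c => c ≠ ".")) with hb
  have hpw : (PySem.List.sorted base (fun x => x) false).Pairwise (· ≤ ·) :=
    PySem.List.sorted_pairwise base (fun x => x)
  rw [runs_eq_sum (2 * n) _ hpw]
  exact sum_perm _ _ _ (PySem.List.sorted_perm base (fun x => x) false)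

-- ===== VERDICT (by name: the statement is the Claim_ definition above) =====
theorem hand_agility_spec : Claim_equal_hand_agility := by
  intro field n _ hpre
  obtain ⟨h1, h2⟩ := hpre
  show _ = _
  rw [a_eq_sum field n h1 h2, b_eq_sum field n h1 h2]
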